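-- pv_equiv track=rewrite | github.com/alswo1212/jungle_baekjoon | 프로그래머스/3/258709. 주사위 고르기/주사위 고르기.py | solution
-- ===== SOURCE A (Python) =====
-- from collections import defaultdict
-- from bisect import bisect_left
--
-- def get_sums(idx, chooses, dice, temp, result):
--     if idx == len(chooses):
--         result.append(temp)
--         return
--     for num in dice[chooses[idx]]:
--         get_sums(idx+1, chooses, dice, temp+num, result)
--
-- def bit_count(num):
--     result = 0
--     while num:
--         if num % 2 == 1:
--             result += 1
--         num >>= 1
--     return result
--
-- def solution(dice):
--     n = len(dice)
--
--     ranges = 1 << n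
--     win_cnt = defaultdict(int)
--     for i in range(ranges):
--         if bit_count(i) == n // 2:
--             choose = [[],[]]
--             idx = 0
--             while idx < n:
--                 choose[i % 2].append(idx)
--                 idx += 1
--                 i >>= 1
--             a, b = [], []
--             key = tuple(choose[0])
--             get_sums(0, choose[0], dice, 0, a)
--             get_sums(0, choose[1], dice, 0, b)
--             a.sort()
--             b.sort()
--             for a_num in a:
--                 win_cnt[key] += bisect_left(b, a_num)
--     max_list = []
--     max_num = 0
--     for key, win_count in win_cnt.items():
--         if win_count > max_num:
--             max_num = win_count
--             max_list = list(key)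
--     for i in range(len(max_list)):
--         max_list[i] += 1
--     return max_list
-- ===== SOURCE B (Python) =====
-- def solution(dice):
--     n = len(dice)
--     best_key, best_wins = [], 0
--     for m in range(1 << n):
--         group0 = [j for j in range(n) if not (m >> j & 1)]
--         if len(group0) != n - n // 2:
--             continue
--         group1 = [j for j in range(n) if m >> j & 1]
--         a = [0]
--         for j in group0:
--             a = [s + f for s in a for f in dice[j]]
--         b = [0]
--         for j in group1:
--             b = [s + f for s in b for f in dice[j]]
--         a.sort()
--         b.sort()
--         wins, k = 0, 0
--         for x in a:
--             while k < len(b) and b[k] < x: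
--                 k += 1
--             wins += k
--         if wins > best_wins:
--             best_wins, best_key = wins, group0
--     return [j + 1 for j in best_key]
-- ===== Notes on version B (the rewrite author's own statement) =====
-- stated objective: alternative
-- what changed: B replaces A's per-sum recursion with comprehension-fold products, the per-element binary search with a single two-pointer merge count over the two sorted sum lists, the hand-written bit_count and bit-peeling while-loops with direct bit-test comprehensions, and the defaultdict plus second argmax pass with an inline running maximum.
import Mathlib
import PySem

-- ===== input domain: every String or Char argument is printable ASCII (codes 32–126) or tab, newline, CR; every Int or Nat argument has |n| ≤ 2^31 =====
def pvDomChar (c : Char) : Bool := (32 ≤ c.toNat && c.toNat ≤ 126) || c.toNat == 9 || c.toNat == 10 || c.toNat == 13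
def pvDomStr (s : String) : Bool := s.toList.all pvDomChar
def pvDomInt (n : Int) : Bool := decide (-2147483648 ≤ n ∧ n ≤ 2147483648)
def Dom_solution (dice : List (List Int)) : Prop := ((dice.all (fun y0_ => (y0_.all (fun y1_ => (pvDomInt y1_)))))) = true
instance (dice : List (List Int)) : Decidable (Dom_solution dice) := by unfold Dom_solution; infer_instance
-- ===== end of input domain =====

-- B replaces A's per-sum recursion, per-element bisect and defaultdict-plus-second-pass argmax by
-- comprehension-fold products, one two-pointer merge count and an inline running maximum.

-- ===== PORT A =====
-- get_sums: the recursion over `chooses` is kept; the cursor `idx` is carried as the remaining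
-- suffix of `chooses`, and the `for num in dice[chooses[idx]]` loop is the mutual `getSumsFor`.
mutual
def getSums (chooses : List Int) (dice : List (List Int)) (temp : Int) (result : List Int) : List Int :=
  match chooses with
  | [] => result ++ [temp]
  | c :: rest => getSumsFor rest dice ((PySem.List.pyGet? dice c).getD []) temp result
      -- dice[chooses[idx]]: `.getD []` is a totality guard only; every index passed is in range
termination_by (chooses.length, 0, 0)

def getSumsFor (rest : List Int) (dice : List (List Int)) (row : List Int) (temp : Int) (result : List Int) : List Int :=
  match row with
  | [] => result
  | num :: rs => getSumsFor rest dice rs temp (getSums rest dice (temp + num) result)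
termination_by (rest.length, 1, row.length)
end


-- bit_count's while loop; Python's guard `while num:` is `num ≠ 0`, which equals `0 < num` on the
-- only values it is called with (i ∈ range(2**n), so num ≥ 0); written `0 < num` to make the port total.
def bitCountGo (num : Int) (result : Int) : Int :=
  if 0 < num then
    bitCountGo (num >>> (1 : Nat)) (if PySem.Int.mod num 2 = 1 then result + 1 else result)
  else result
termination_by num.toNat
decreasing_by simp_wf; rw [Int.shiftRight_eq_div_pow]; omega

def bitCount (num : Int) : Int := bitCountGo num 0

-- the `while idx < n` bit-peeling loop building choose[0] / choose[1]
def peel (n : Nat) (idx : Nat) (i : Int) (c0 c1 : List Int) : List Int × List Int :=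
  if idx < n then
    if PySem.Int.mod i 2 = 1 then peel n (idx + 1) (i >>> (1 : Nat)) c0 (c1 ++ [(idx : Int)])
    else peel n (idx + 1) (i >>> (1 : Nat)) (c0 ++ [(idx : Int)]) c1
  else (c0, c1)
termination_by n - idx

def solution (dice : List (List Int)) : List Int :=
  let n := dice.length
  let ranges : Int := 1 <<< n
  let win_cnt : PySem.Dict (List Int) Int :=
    (PySem.List.pyRange 0 ranges 1).foldl (fun d i =>
      if bitCount i = ((n / 2 : Nat) : Int) then
        let c := peel n 0 i [] []
        let key := c.1
        let a := getSums c.1 dice 0 []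
        let b := getSums c.2 dice 0 []
        let a := PySem.List.sorted a (fun x => x) false
        let b := PySem.List.sorted b (fun x => x) false
        a.foldl (fun d a_num => d.modify key 0 (· + (PySem.List.bisectLeft b a_num : Int))) d
      else d) PySem.Dict.empty
  let p := win_cnt.items.foldl
    (fun (acc : Int × List Int) kv => if kv.2 > acc.1 then (kv.2, kv.1) else acc) (0, [])
  let max_list := p.2
  (PySem.List.pyRange 0 (PySem.List.len max_list) 1).foldl
    (fun l i => PySem.List.pySetD l i (PySem.List.pyGetD l i 0 + 1)) max_list

-- ===== PORT B =====
-- the `while k < len(b) and b[k] < x` pointer advance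
def advancePtr (b : List Int) (k : Nat) (x : Int) : Nat :=
  if h : k < b.length then
    if b[k] < x then advancePtr b (k + 1) x else k
  else k
termination_by b.length - k
decreasing_by omega

-- `[s + f for s in acc for f in dice[j]]` folded over the group (j from range(n), so j ≥ 0)
def prodSums (dice : List (List Int)) (group : List Int) : List Int :=
  group.foldl (fun acc j => acc.flatMap (fun s => ((PySem.List.pyGet? dice j).getD []).map (fun f => s + f))) [0]

def solution_alt (dice : List (List Int)) : List Int :=
  let n := dice.length
  let best :=
    (PySem.List.pyRange 0 (1 <<< n) 1).foldl (fun (best : Int × List Int) m =>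
      let group0 := (PySem.List.pyRange 0 (n : Int) 1).filter
        (fun j => PySem.Int.band (m >>> j.toNat) 1 == 0)   -- `not (m >> j & 1)`; j ≥ 0 so `.toNat` is exact
      if group0.length ≠ n - n / 2 then best
      else
        let group1 := (PySem.List.pyRange 0 (n : Int) 1).filter
          (fun j => !(PySem.Int.band (m >>> j.toNat) 1 == 0))
        let a := PySem.List.sorted (prodSums dice group0) (fun x => x) false
        let b := PySem.List.sorted (prodSums dice group1) (fun x => x) false
        let wk := a.foldl (fun (p : Int × Nat) x =>
          let k := advancePtr b p.2 x
          (p.1 + (k : Int), k)) (0, 0)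
        if wk.1 > best.1 then (wk.1, group0) else best) ((0 : Int), ([] : List Int))
  best.2.map (fun j => j + 1)

-- ===== PRECONDITION & SPEC =====
def Spec_solution (dice : List (List Int)) (out : List Int) : Prop := out = solution_alt dice
instance (dice : List (List Int)) (out : List Int) : Decidable (Spec_solution dice out) := by unfold Spec_solution; infer_instance

-- ===== CLAIM (what is proved, stated in full; the proofs are below) =====
def Claim_equal_solution : Prop := ∀ (dice : List (List Int)), Dom_solution dice → Spec_solution dice (solution dice)

-- ===== LEMMAS AND PROOFS =====

-- proof-side vocabulary
def rowOf (dice : List (List Int)) (c : Int) : List Int := (PySem.List.pyGet? dice c).getD []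

def cart (dice : List (List Int)) : List Int → List Int
  | [] => [0]
  | c :: rest => (rowOf dice c).flatMap (fun v => (cart dice rest).map (fun s => v + s))

def g0 (n k : Nat) : List Int := ((List.range n).filter (fun j => !(k.testBit j))).map Nat.cast
def g1 (n k : Nat) : List Int := ((List.range n).filter (fun j => k.testBit j)).map Nat.cast
def countLT (b : List Int) (x : Int) : Nat := b.countP (fun y => decide (y < x))
def aS (dice : List (List Int)) (n k : Nat) : List Int := PySem.List.sorted (cart dice (g0 n k)) (fun x => x) false
def bS (dice : List (List Int)) (n k : Nat) : List Int := PySem.List.sorted (cart dice (g1 n k)) (fun x => x) false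
def winsOf (a b : List Int) : Int := (a.map (fun x => (countLT b x : Int))).sum
def Wm (dice : List (List Int)) (n k : Nat) : Int := winsOf (aS dice n k) (bS dice n k)
def qual (n k : Nat) : Bool := (List.range n).countP (fun j => k.testBit j) == n / 2
def qualMasks (n : Nat) : List Nat := (List.range (2^n)).filter (qual n)
def cand (dice : List (List Int)) (n : Nat) : List (List Int × Int) :=
  (qualMasks n).map (fun k => (g0 n k, Wm dice n k))
def maxStep (acc : Int × List Int) (kv : List Int × Int) : Int × List Int :=
  if kv.2 > acc.1 then (kv.2, kv.1) else acc

-- (1) get_sums produces the cartesian face sums, shifted by temp, appended to result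
lemma getSums_eq (dice : List (List Int)) : ∀ (chooses : List Int) (temp : Int) (result : List Int),
    getSums chooses dice temp result = result ++ (cart dice chooses).map (fun s => temp + s) := by
  intro chooses
  induction chooses with
  | nil => intro temp result; simp [getSums, cart]
  | cons c rest ih =>
    have hFor : ∀ (row : List Int) (temp : Int) (result : List Int),
        getSumsFor rest dice row temp result
          = result ++ row.flatMap (fun num => (cart dice rest).map (fun s => (temp + num) + s)) := by
      intro row
      induction row with
      | nil => intro temp result; simp [getSumsFor]
      | cons num rs ihr =>
        intro temp result
        rw [getSumsFor, ih, ihr]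
        simp [List.append_assoc]
    intro temp result
    rw [getSums, hFor]
    show _ = result ++ (cart dice (c :: rest)).map _
    simp only [cart, rowOf, List.map_flatMap, List.map_map]
    congr 1
    apply List.flatMap_congr ?_
    intro v _
    apply List.map_congr_left
    intro s _
    simp [Function.comp]; ring

-- (2) B's comprehension fold produces the same cartesian sums
lemma prodSums_fold (dice : List (List Int)) : ∀ (g : List Int) (acc : List Int),
    g.foldl (fun acc j => acc.flatMap (fun s => ((PySem.List.pyGet? dice j).getD []).map (fun f => s + f))) acc
      = acc.flatMap (fun s => (cart dice g).map (fun c => s + c)) := by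
  intro g
  induction g with
  | nil => intro acc; simp [cart]
  | cons j rest ih =>
    intro acc
    rw [List.foldl_cons, ih]
    simp only [cart, rowOf, List.flatMap_assoc, List.map_flatMap, List.map_map]
    apply List.flatMap_congr ?_
    intro s _
    rw [List.flatMap_map]
    apply List.flatMap_congr ?_
    intro v _
    apply List.map_congr_left
    intro c _
    simp [Function.comp]; ring

lemma prodSums_eq (dice : List (List Int)) (g : List Int) : prodSums dice g = cart dice g := by
  rw [prodSums, prodSums_fold]
  simp

-- (3) in a sorted list, the elements below x are exactly the first countLT positions
lemma countLT_getElem_iff : ∀ (b : List Int), b.Pairwise (· ≤ ·) →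
    ∀ (x : Int) (i : Nat) (hi : i < b.length), (b[i] < x ↔ i < countLT b x) := by
  intro b hb
  induction b with
  | nil => intro x i hi; simp at hi
  | cons y t ih =>
    rw [List.pairwise_cons] at hb
    intro x i hi
    by_cases hy : y < x
    · have hc' : countLT (y :: t) x = countLT t x + 1 := by
        simp [countLT, hy]
      cases i with
      | zero => simpa [hy] using by omega
      | succ i =>
        have hi' : i < t.length := by simpa using hi
        have := ih hb.2 x i hi'
        simpa [hc'] using by omega
    · have ht : countLT t x = 0 := by
        rw [countLT, List.countP_eq_zero]
        intro z hz
        simp only [decide_eq_true_eq]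
        have := hb.1 z hz
        omega
      have hc : countLT (y :: t) x = 0 := by
        simp [countLT, hy] at *
        omega
      cases i with
      | zero => simp [hy, hc]
      | succ i =>
        have hi' : i < t.length := by simpa using hi
        have hz : y ≤ t[i] := hb.1 _ (List.getElem_mem hi')
        simp only [List.getElem_cons_succ, hc]
        constructor
        · intro h; omega
        · intro h; omega

-- (4) bisect_left on a sorted list counts the elements below x
lemma bisectLeft_eq (b : List Int) (hb : b.Pairwise (· ≤ ·)) (x : Int) :
    PySem.List.bisectLeft b x = countLT b x := by
  obtain ⟨hle, hlt, hge⟩ := PySem.List.bisectLeft_spec b x hb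
  have hcle : countLT b x ≤ b.length := List.countP_le_length
  rcases lt_trichotomy (PySem.List.bisectLeft b x) (countLT b x) with h | h | h
  · have hib : PySem.List.bisectLeft b x < b.length := lt_of_lt_of_le h hcle
    have : b[PySem.List.bisectLeft b x] < x := (countLT_getElem_iff b hb x _ hib).mpr h
    have := hge _ hib le_rfl
    omega
  · exact h
  · have hib : countLT b x < b.length := lt_of_lt_of_le h hle
    have hx : b[countLT b x] < x := hlt _ hib h
    have := (countLT_getElem_iff b hb x _ hib).mp hx
    omega

-- (5) the two-pointer advance lands on countLT when started at or below it
lemma advancePtr_eq (b : List Int) (hb : b.Pairwise (· ≤ ·)) (x : Int) :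
    ∀ (k : Nat), k ≤ countLT b x → advancePtr b k x = countLT b x := by
  have hcle : countLT b x ≤ b.length := List.countP_le_length
  have main : ∀ (m k : Nat), b.length - k ≤ m → k ≤ countLT b x → advancePtr b k x = countLT b x := by
    intro m
    induction m with
    | zero =>
      intro k hm hk
      rw [advancePtr]
      have : ¬ k < b.length := by omega
      simp [this]
      omega
    | succ m ih =>
      intro k hm hk
      rw [advancePtr]
      by_cases hkb : k < b.length
      · simp only [hkb, dif_pos]
        by_cases hbx : b[k] < x
        · have : k < countLT b x := (countLT_getElem_iff b hb x k hkb).mp hbx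
          simp only [hbx, if_pos]
          exact ih (k+1) (by omega) (by omega)
        · have : ¬ k < countLT b x := fun hlt => hbx ((countLT_getElem_iff b hb x k hkb).mpr hlt)
          simp only [hbx, if_neg, not_false_iff]
          omega
      · simp [hkb]
        omega
  exact fun k hk => main (b.length - k) k le_rfl hk

-- (6) the whole two-pointer pass sums the per-element counts
lemma twoPtr_eq (b : List Int) (hb : b.Pairwise (· ≤ ·)) :
    ∀ (a : List Int), a.Pairwise (· ≤ ·) → ∀ (k : Nat) (w : Int), (∀ x ∈ a, k ≤ countLT b x) →
      (a.foldl (fun (p : Int × Nat) x =>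
        (p.1 + (advancePtr b p.2 x : Int), advancePtr b p.2 x)) (w, k)).1 = w + winsOf a b := by
  intro a
  induction a with
  | nil => intro _ k w _; simp [winsOf]
  | cons x xs ih =>
    intro ha k w hk
    rw [List.pairwise_cons] at ha
    rw [List.foldl_cons]
    have hadv : advancePtr b k x = countLT b x := advancePtr_eq b hb x k (hk x (by simp))
    rw [hadv]
    have hnext : ∀ y ∈ xs, countLT b x ≤ countLT b y := by
      intro y hy
      apply List.countP_mono_left
      intro z _ hz
      simp only [decide_eq_true_eq] at *
      have := ha.1 y hy
      omega
    rw [ih ha.2 (countLT b x) (w + (countLT b x : Int)) hnext]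
    simp [winsOf]
    ring

-- inserting the value a key already holds changes nothing
lemma insert_same (d : PySem.Dict (List Int) Int) (key : List Int) (v : Int)
    (hnd : d.keys.Nodup) (hv : d.get? key = some v) : d.insert key v = d := by
  have hcont : d.contains key = true := by
    rw [PySem.Dict.contains_eq_isSome_get?, hv]; rfl
  apply PySem.Dict.ext
  rw [PySem.Dict.items_insert_of_contains d v hcont]
  have hpt : ∀ p ∈ d.items, (if (p.1 == key) = true then (key, v) else p) = p := by
    intro p hp
    by_cases h : (p.1 == key) = true
    · have hk : p.1 = key := by simpa using h
      have hmem : (key, p.2) ∈ d.items := by rw [← hk]; exact hp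
      have := PySem.Dict.get?_of_mem_items d hmem hnd
      rw [hv] at this
      simp only [h, if_pos, Option.some.injEq] at *
      rw [← hk, this]
    · simp [h]
  rw [List.map_congr_left hpt]; simp

-- (7) accumulating `d[key] += c x` over a list, key already present with value v
lemma mod_fold_present (c : Int → Int) : ∀ (a : List Int) (d : PySem.Dict (List Int) Int)
    (key : List Int) (v : Int), d.keys.Nodup → d.get? key = some v →
    a.foldl (fun d x => d.modify key 0 (fun w => w + c x)) d = d.insert key (v + (a.map c).sum) := by
  intro a
  induction a with
  | nil =>
    intro d key v hnd hv
    simp only [List.foldl_nil, List.map_nil, List.sum_nil, add_zero]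
    exact (insert_same d key v hnd hv).symm
  | cons x xs ih =>
    intro d key v hnd hv
    rw [List.foldl_cons]
    have hmod : d.modify key 0 (fun w => w + c x) = d.insert key (d.getD key 0 + c x) := rfl
    rw [hmod, PySem.Dict.getD_of_get?_eq_some d 0 hv,
      ih (d.insert key (v + c x)) key (v + c x)
        (PySem.Dict.nodup_keys_insert d key (v + c x) hnd) (PySem.Dict.get?_insert_self d key (v + c x)),
      PySem.Dict.insert_insert_self]
    congr 1
    simp [List.sum_cons]
    ring

-- (7') same, for a fresh key and a nonempty list
lemma mod_fold_fresh (c : Int → Int) (a : List Int) (d : PySem.Dict (List Int) Int)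
    (key : List Int) (ha : a ≠ []) (hnd : d.keys.Nodup) (hk : key ∉ d.keys) :
    a.foldl (fun d x => d.modify key 0 (fun w => w + c x)) d = d.insert key ((a.map c).sum) := by
  obtain ⟨x, xs, rfl⟩ : ∃ x xs, a = x :: xs := by
    cases a with
    | nil => exact absurd rfl ha
    | cons x xs => exact ⟨x, xs, rfl⟩
  rw [List.foldl_cons]
  have hcont : d.contains key = false := by
    cases h : d.contains key
    · rfl
    · exact absurd ((PySem.Dict.contains_iff_mem_keys d key).mp h) hk
  have hmod : d.modify key 0 (fun w => w + c x) = d.insert key (d.getD key 0 + c x) := rfl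
  rw [hmod, PySem.Dict.getD_of_not_contains d 0 hcont,
    mod_fold_present c xs (d.insert key (0 + c x)) key (0 + c x)
      (PySem.Dict.nodup_keys_insert d key (0 + c x) hnd) (PySem.Dict.get?_insert_self d key (0 + c x)),
    PySem.Dict.insert_insert_self]
  congr 1
  simp [List.sum_cons]

-- pushing a successor map out of a filtered range
lemma filt_shift (P : Nat → Bool) (idx : Nat) (L : Nat) :
    List.map (fun j => ((idx + j : Nat) : Int)) ((List.map Nat.succ (List.range L)).filter P)
      = List.map (fun j => (((idx + 1) + j : Nat) : Int)) ((List.range L).filter (fun j => P (Nat.succ j))) := by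
  rw [List.filter_map, List.map_map]
  apply List.map_congr_left
  intro j _
  simp only [Function.comp]
  push_cast
  ring

-- (8) the bit-peeling while loop computes the zero-bit and one-bit index lists
lemma peel_aux : ∀ (m n idx : Nat) (v : Nat) (c0 c1 : List Int), n - idx ≤ m →
    peel n idx (v : Int) c0 c1 =
      (c0 ++ ((List.range (n - idx)).filter (fun j => !(v.testBit j))).map (fun j => ((idx + j : Nat) : Int)),
       c1 ++ ((List.range (n - idx)).filter (fun j => v.testBit j)).map (fun j => ((idx + j : Nat) : Int))) := by
  intro m
  induction m with
  | zero =>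
    intro n idx v c0 c1 hm
    have hge : ¬ idx < n := by omega
    have h0 : n - idx = 0 := by omega
    rw [peel]
    simp [hge, h0]
  | succ m ih =>
    intro n idx v c0 c1 hm
    by_cases hlt : idx < n
    · have hsub : n - idx = (n - (idx + 1)) + 1 := by omega
      have hshift : (v : Int) >>> (1 : Nat) = ((v / 2 : Nat) : Int) := by
        rw [Int.shiftRight_eq_div_pow]
        push_cast
        omega
      have hmod : PySem.Int.mod (v : Int) 2 = ((v % 2 : Nat) : Int) := by
        exact_mod_cast PySem.Int.mod_natCast v 2
      have hrange : List.range (n - idx) = 0 :: (List.range (n - (idx+1))).map Nat.succ := by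
        rw [hsub, List.range_succ_eq_map]
      have htb : ∀ j, v.testBit (Nat.succ j) = (v / 2).testBit j := fun j => Nat.testBit_succ v j
      have hb0 : v.testBit 0 = decide (v % 2 = 1) := by
        simp [Nat.testBit_zero]
      rw [peel, if_pos hlt, hmod, hshift]
      by_cases hodd : v % 2 = 1
      · rw [if_pos (by omega : ((v % 2 : Nat) : Int) = 1),
          ih n (idx+1) (v/2) c0 (c1 ++ [(idx : Int)]) (by omega), hrange]
        simp only [Prod.mk.injEq]
        refine ⟨?_, ?_⟩
        · simp only [List.filter_cons, hb0, hodd, decide_true, Bool.not_true, Bool.false_eq_true,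
            not_false_eq_true, if_neg]
          rw [filt_shift]
          apply congrArg
          apply congrArg
          apply List.filter_congr
          intro j _
          simp [htb]
        · simp only [List.filter_cons, hb0, hodd, decide_true, if_pos, List.map_cons,
            List.append_assoc, List.singleton_append]
          rw [filt_shift]
          simp only [Nat.add_zero]
          apply congrArg
          apply congrArg
          apply congrArg
          apply List.filter_congr
          intro j _
          simp [htb]
      · rw [if_neg (by omega : ¬ ((v % 2 : Nat) : Int) = 1),
          ih n (idx+1) (v/2) (c0 ++ [(idx : Int)]) c1 (by omega), hrange]
        simp only [Prod.mk.injEq]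
        refine ⟨?_, ?_⟩
        · have hb0' : v.testBit 0 = false := by rw [hb0]; simp; omega
          simp only [List.filter_cons, hb0', Bool.not_false, if_pos, List.map_cons,
            List.append_assoc, List.singleton_append]
          rw [filt_shift]
          simp only [Nat.add_zero]
          apply congrArg
          apply congrArg
          apply congrArg
          apply List.filter_congr
          intro j _
          simp [htb]
        · have hb0' : v.testBit 0 = false := by rw [hb0]; simp; omega
          simp only [List.filter_cons, hb0', Bool.false_eq_true, not_false_eq_true, if_neg]
          rw [filt_shift]
          apply congrArg
          apply congrArg
          apply List.filter_congr
          intro j _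
          simp [htb]
    · have hge : n - idx = 0 := by omega
      rw [peel]
      simp [hlt, hge]

lemma peel_eq (n k : Nat) : peel n 0 (k : Int) [] [] = (g0 n k, g1 n k) := by
  rw [peel_aux n n 0 k [] [] (by omega)]
  simp [g0, g1]

-- (9) bit_count counts the set bits
lemma bitCountGo_eq : ∀ (L v : Nat) (r : Int), v < 2^L →
    bitCountGo (v : Int) r = r + (((List.range L).countP (fun j => v.testBit j) : Nat) : Int) := by
  intro L
  induction L with
  | zero =>
    intro v r hv
    have : v = 0 := by omega
    subst this
    rw [bitCountGo]
    simp
  | succ L ih =>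
    intro v r hv
    by_cases hv0 : v = 0
    · subst hv0
      rw [bitCountGo]
      simp [Nat.zero_testBit]
    · have hpos : (0 : Int) < (v : Int) := by omega
      have hshift : (v : Int) >>> (1 : Nat) = ((v / 2 : Nat) : Int) := by
        rw [Int.shiftRight_eq_div_pow]
        push_cast
        omega
      have hmod : PySem.Int.mod (v : Int) 2 = ((v % 2 : Nat) : Int) := by
        exact_mod_cast PySem.Int.mod_natCast v 2
      have hcount : (List.range (L+1)).countP (fun j => v.testBit j)
          = (if v.testBit 0 then 1 else 0) + (List.range L).countP (fun j => (v / 2).testBit j) := by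
        rw [List.range_succ_eq_map, List.countP_cons, List.countP_map]
        have : ((fun j => v.testBit j) ∘ Nat.succ) = (fun j => (v / 2).testBit j) := by
          funext j
          simp [Function.comp, Nat.testBit_succ]
        rw [this]
        rcases Bool.eq_false_or_eq_true (v.testBit 0) with hb | hb
        · simp [hb]
          omega
        · simp [hb]
      have hdiv : v / 2 < 2^L := by
        have : (2:Nat)^(L+1) = 2 * 2^L := by ring
        omega
      rw [bitCountGo, if_pos hpos, hshift, hmod, ih (v/2) _ hdiv, hcount]
      have hb0 : v.testBit 0 = decide (v % 2 = 1) := by simp [Nat.testBit_zero]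
      by_cases hodd : v % 2 = 1
      · rw [if_pos (by omega : ((v % 2 : Nat) : Int) = 1)]
        simp [hb0, hodd]
        ring
      · rw [if_neg (by omega : ¬ ((v % 2 : Nat) : Int) = 1)]
        have : v.testBit 0 = false := by rw [hb0]; simp; omega
        simp [this]

lemma bitCount_eq (n k : Nat) (h : k < 2^n) :
    bitCount (k : Int) = (((List.range n).countP (fun j => k.testBit j) : Nat) : Int) := by
  rw [bitCount, bitCountGo_eq n k 0 h]
  simp

-- (10) B's comprehension tests read the same bits
lemma bandBit_eq (k j : Nat) : (PySem.Int.band ((k : Int) >>> (j : Nat)) 1 == 0) = !(k.testBit j) := by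
  have hshift : (k : Int) >>> (j : Nat) = ((k >>> j : Nat) : Int) := by
    rw [Int.shiftRight_eq_div_pow, Nat.shiftRight_eq_div_pow]
    push_cast
    omega
  rw [hshift]
  have hband : PySem.Int.band ((k >>> j : Nat) : Int) 1 = (((k >>> j) &&& 1 : Nat) : Int) := by
    exact_mod_cast PySem.Int.band_natCast (k >>> j) 1
  rw [hband]
  have htb : k.testBit j = decide (k >>> j &&& 1 = 1) := by
    rw [Nat.testBit_eq_decide_div_mod_eq, Nat.and_one_is_mod, Nat.shiftRight_eq_div_pow]
  rw [htb]
  have : k >>> j &&& 1 = (k >>> j) % 2 := Nat.and_one_is_mod _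
  by_cases h : (k >>> j) &&& 1 = 1
  · simp [h]
  · have h0 : (k >>> j) &&& 1 = 0 := by omega
    simp [h0]

lemma groupB0_eq (n k : Nat) :
    (PySem.List.pyRange 0 (n : Int) 1).filter (fun j => PySem.Int.band (@HShiftRight.hShiftRight Int Nat Int Int.instHShiftRightNat (k : Int) j.toNat) 1 == 0) = g0 n k := by
  rw [PySem.List.pyRange_zero_nat, List.filter_map]
  rw [g0]
  congr 1
  apply List.filter_congr
  intro j _
  simp only [Function.comp, Int.toNat_natCast]
  exact bandBit_eq k j

lemma groupB1_eq (n k : Nat) :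
    (PySem.List.pyRange 0 (n : Int) 1).filter (fun j => !(PySem.Int.band (@HShiftRight.hShiftRight Int Nat Int Int.instHShiftRightNat (k : Int) j.toNat) 1 == 0)) = g1 n k := by
  rw [PySem.List.pyRange_zero_nat, List.filter_map]
  rw [g1]
  congr 1
  apply List.filter_congr
  intro j _
  simp only [Function.comp, Int.toNat_natCast]
  rw [bandBit_eq k j]
  simp

-- (11) sizes of the two groups
lemma g0_length (n k : Nat) :
    (g0 n k).length = n - (List.range n).countP (fun j => k.testBit j) := by
  rw [g0, List.length_map, ← List.countP_eq_length_filter]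
  have h1 : (List.range n).countP (fun j => !k.testBit j)
      + (List.range n).countP (fun j => k.testBit j) = n := by
    have : ∀ (l : List Nat), l.countP (fun x => !k.testBit x) + l.countP (fun x => k.testBit x) = l.length := by
      intro l
      induction l with
      | nil => simp
      | cons x t ih => by_cases h : k.testBit x <;> simp [h] <;> omega
    simpa using this (List.range n)
  omega

-- (12) both per-mask admission tests are `qual`
lemma qualA_iff (n k : Nat) (h : k < 2^n) :
    (bitCount (k : Int) = ((n / 2 : Nat) : Int)) ↔ qual n k = true := by
  rw [bitCount_eq n k h, qual]
  simp
  omega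

lemma qualB_iff (n k : Nat) : ((g0 n k).length ≠ n - n / 2) ↔ ¬ (qual n k = true) := by
  rw [g0_length, qual]
  have hle : (List.range n).countP (fun j => k.testBit j) ≤ n := by
    have := List.countP_le_length (p := fun j => k.testBit j) (l := List.range n)
    simpa using this
  have hd : n / 2 ≤ n := Nat.div_le_self n 2
  simp
  omega

-- (13) the dict after the whole mask loop lists (key, wins) per mask with a nonempty sum list
lemma fold_insert_items (dice : List (List Int)) (n : Nat) : ∀ (ms : List Nat) (d : PySem.Dict (List Int) Int),
    d.keys.Nodup → (∀ k ∈ ms, g0 n k ∉ d.keys) → (ms.map (g0 n)).Nodup →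
    ((ms.foldl (fun d k => (aS dice n k).foldl
        (fun d x => d.modify (g0 n k) 0 (fun w => w + ((countLT (bS dice n k) x : Nat) : Int))) d) d).items
      = d.items ++ (ms.filter (fun k => !(cart dice (g0 n k) == []))).map (fun k => (g0 n k, Wm dice n k))) := by
  intro ms
  induction ms with
  | nil => intro d _ _ _; simp
  | cons k ms ih =>
    intro d hnd hfresh hmapnd
    rw [List.foldl_cons]
    rw [List.map_cons, List.nodup_cons] at hmapnd
    by_cases hc : cart dice (g0 n k) = []
    · have haS : aS dice n k = [] := (PySem.List.sorted_eq_nil_iff _ _ _).mpr hc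
      rw [haS, List.foldl_nil,
        ih d hnd (fun k' hk' => hfresh k' (List.mem_cons_of_mem k hk')) hmapnd.2]
      simp [hc]
    · have haS : aS dice n k ≠ [] := fun h => hc ((PySem.List.sorted_eq_nil_iff _ _ _).mp h)
      have hki : g0 n k ∉ d.keys := hfresh k List.mem_cons_self
      rw [mod_fold_fresh _ _ d _ haS hnd hki]
      have hsum : ((aS dice n k).map (fun x => ((countLT (bS dice n k) x : Nat) : Int))).sum
          = Wm dice n k := rfl
      rw [hsum]
      have hcont : d.contains (g0 n k) = false := by
        cases h : d.contains (g0 n k)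
        · rfl
        · exact absurd ((PySem.Dict.contains_iff_mem_keys d _).mp h) hki
      have hkeys' : (d.insert (g0 n k) (Wm dice n k)).keys = d.keys ++ [g0 n k] :=
        PySem.Dict.keys_insert_of_not_contains d _ hcont
      have hfresh' : ∀ k' ∈ ms, g0 n k' ∉ (d.insert (g0 n k) (Wm dice n k)).keys := by
        intro k' hk'
        rw [hkeys']
        simp only [List.mem_append, List.mem_singleton]
        rintro (h | h)
        · exact hfresh k' (List.mem_cons_of_mem k hk') h
        · exact hmapnd.1 (h ▸ List.mem_map_of_mem hk')
      rw [ih _ (PySem.Dict.nodup_keys_insert d _ _ hnd) hfresh' hmapnd.2,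
        PySem.Dict.items_insert_of_not_contains d _ hcont]
      simp [hc]

-- (14) distinct masks give distinct zero-bit groups
lemma g0_nodup (n : Nat) (ms : List Nat) (hms : ms.Nodup) (hlt : ∀ k ∈ ms, k < 2^n) :
    (ms.map (g0 n)).Nodup := by
  apply List.Nodup.map_on ?_ hms
  intro k1 h1 k2 h2 heq
  have hfil : (List.range n).filter (fun j => !(k1.testBit j))
      = (List.range n).filter (fun j => !(k2.testBit j)) := by
    have : Function.Injective (Nat.cast : Nat → Int) := fun a b h => by exact_mod_cast h
    exact List.map_injective_iff.mpr this heq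
  apply Nat.eq_of_testBit_eq
  intro j
  by_cases hj : j < n
  · have hmem : ∀ (v : Nat), (j ∈ (List.range n).filter (fun i => !(v.testBit i))) ↔ ¬ v.testBit j = true := by
      intro v
      simp [List.mem_filter, List.mem_range, hj]
    have := (hmem k1).symm.trans (Iff.trans (by rw [hfil]) (hmem k2))
    by_cases hb : k1.testBit j
    · by_cases hb2 : k2.testBit j
      · rw [hb, hb2]
      · exact absurd hb (by simpa [hb2] using this.symm)
    · by_cases hb2 : k2.testBit j
      · exact absurd hb2 (by simpa [hb] using this)
      · rw [Bool.eq_false_iff.mpr hb, Bool.eq_false_iff.mpr hb2]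
  · have e1 : k1.testBit j = false :=
      Nat.testBit_eq_false_of_lt (lt_of_lt_of_le (hlt k1 h1) (Nat.pow_le_pow_right (by norm_num) (by omega)))
    have e2 : k2.testBit j = false :=
      Nat.testBit_eq_false_of_lt (lt_of_lt_of_le (hlt k2 h2) (Nat.pow_le_pow_right (by norm_num) (by omega)))
    rw [e1, e2]

-- (15) the running maximum ignores entries that can never win (strict > from a start ≥ 0)
lemma maxFold_drop : ∀ (L : List (List Int × Int)) (acc : Int × List Int), 0 ≤ acc.1 →
    L.foldl maxStep acc = (L.filter (fun kv => decide (0 < kv.2))).foldl maxStep acc := by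
  intro L
  induction L with
  | nil => simp
  | cons kv L ih =>
    intro acc hacc
    rw [List.foldl_cons, List.filter_cons]
    by_cases h : 0 < kv.2
    · simp only [h, decide_true, if_pos, List.foldl_cons]
      apply ih
      rw [maxStep]
      split_ifs with hgt
      · exact le_of_lt h
      · exact hacc
    · have hstep : maxStep acc kv = acc := by
        rw [maxStep, if_neg (by omega)]
      simp only [h, decide_false, Bool.false_eq_true, not_false_eq_true, if_neg, hstep]
      exact ih acc hacc

lemma Wm_of_cart_nil (dice : List (List Int)) (n k : Nat) (h : cart dice (g0 n k) = []) :
    Wm dice n k = 0 := by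
  rw [Wm, aS, (PySem.List.sorted_eq_nil_iff _ _ _).mpr h]
  simp [winsOf]

-- (16) the final `max_list[i] += 1` loop is a map
lemma plusOne_fold (l : List Int) :
    (PySem.List.pyRange 0 (PySem.List.len l) 1).foldl
      (fun l i => PySem.List.pySetD l i (PySem.List.pyGetD l i 0 + 1)) l = l.map (· + 1) := by
  have aux : ∀ (m a : Nat) (l : List Int), l.length - a ≤ m →
      (PySem.List.pyRange (a : Int) (l.length : Int) 1).foldl
        (fun l i => PySem.List.pySetD l i (PySem.List.pyGetD l i 0 + 1)) l
      = l.take a ++ (l.drop a).map (· + 1) := by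
    intro m
    induction m with
    | zero =>
      intro a l hm
      have hle : l.length ≤ a := by omega
      rw [PySem.List.pyRange_one_eq_nil (by exact_mod_cast hle)]
      simp [List.take_of_length_le hle, List.drop_of_length_le hle]
    | succ m ih =>
      intro a l hm
      by_cases hlt : a < l.length
      · rw [PySem.List.pyRange_one_cons (by exact_mod_cast hlt), List.foldl_cons]
        have hset : PySem.List.pySetD l (a : Int) (PySem.List.pyGetD l (a : Int) 0 + 1)
            = l.set a (l[a]'hlt + 1) := by
          rw [PySem.List.pySetD_natCast, PySem.List.pyGetD_natCast, List.getD_eq_getElem l 0 hlt]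
        have hcast : ((a : Int) + 1) = ((a + 1 : Nat) : Int) := by push_cast; ring
        rw [hset, hcast]
        have hlen : (l.set a (l[a]'hlt + 1)).length = l.length := by simp
        rw [show ((l.length : Int)) = (((l.set a (l[a]'hlt + 1)).length : Int)) by rw [hlen]]
        rw [ih (a+1) _ (by simp; omega)]
        have hsplit : l.set a (l[a]'hlt + 1) = (l.take a ++ [l[a]'hlt + 1]) ++ l.drop (a+1) := by
          rw [List.set_eq_take_cons_drop _ hlt]
          simp
        rw [hsplit]
        have hlen2 : (l.take a ++ [l[a]'hlt + 1]).length = a + 1 := by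
          simp [List.length_take, Nat.min_eq_left (le_of_lt hlt)]
        rw [List.take_left' hlen2, List.drop_left' hlen2,
          List.drop_eq_getElem_cons hlt, List.map_cons]
        simp
      · have hle : l.length ≤ a := by omega
        rw [PySem.List.pyRange_one_eq_nil (by exact_mod_cast hle)]
        simp [List.take_of_length_le hle, List.drop_of_length_le hle]
  have h0 := aux l.length 0 l (by omega)
  rw [PySem.List.len_eq]
  simpa using h0

-- (17) assembly
lemma mask_list (n : Nat) :
    PySem.List.pyRange 0 (((1 <<< n : Nat) : Int)) 1 = (List.range (2^n)).map (Nat.cast : Nat → Int) := by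
  rw [Nat.one_shiftLeft, PySem.List.pyRange_zero_nat]

lemma aS_pairwise (dice : List (List Int)) (n k : Nat) : (aS dice n k).Pairwise (· ≤ ·) := by
  simpa using PySem.List.sorted_pairwise (cart dice (g0 n k)) (fun x => x)

lemma bS_pairwise (dice : List (List Int)) (n k : Nat) : (bS dice n k).Pairwise (· ≤ ·) := by
  simpa using PySem.List.sorted_pairwise (cart dice (g1 n k)) (fun x => x)

lemma B_char (dice : List (List Int)) :
    solution_alt dice
      = ((cand dice dice.length).foldl maxStep ((0 : Int), ([] : List Int))).2.map (fun j => j + 1) := by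
  simp only [solution_alt]
  rw [mask_list, List.foldl_map]
  rw [PySem.List.foldl_congr_mem (List.range (2^dice.length)) _
    (fun best k => if qual dice.length k = true then maxStep best (g0 dice.length k, Wm dice dice.length k) else best)
    ((0 : Int), ([] : List Int)) ?hstep]
  · rw [PySem.List.foldl_ite_eq_foldl_filter (fun k => qual dice.length k = true)]
    have hfq : (List.range (2^dice.length)).filter (fun x => decide (qual dice.length x = true))
        = qualMasks dice.length := by
      rw [qualMasks]
      apply List.filter_congr
      intro x _
      simp
    rw [hfq, cand, List.foldl_map]
  case hstep =>
    intro best k _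
    dsimp only
    rw [groupB0_eq]
    by_cases hq : qual dice.length k = true
    · rw [if_neg (by intro h; exact (qualB_iff dice.length k).mp h hq), if_pos hq,
        groupB1_eq, prodSums_eq, prodSums_eq]
      have hwk : ((PySem.List.sorted (cart dice (g0 dice.length k)) (fun x => x) false).foldl
          (fun (p : Int × Nat) x =>
            (p.1 + (advancePtr (PySem.List.sorted (cart dice (g1 dice.length k)) (fun x => x) false) p.2 x : Int),
              advancePtr (PySem.List.sorted (cart dice (g1 dice.length k)) (fun x => x) false) p.2 x))
          ((0 : Int), (0 : Nat))).1 = Wm dice dice.length k := by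
        show ((aS dice dice.length k).foldl (fun (p : Int × Nat) x =>
          (p.1 + (advancePtr (bS dice dice.length k) p.2 x : Int), advancePtr (bS dice dice.length k) p.2 x))
          ((0 : Int), (0 : Nat))).1 = Wm dice dice.length k
        rw [twoPtr_eq (bS dice dice.length k) (bS_pairwise dice dice.length k)
          (aS dice dice.length k) (aS_pairwise dice dice.length k) 0 0
          (fun x _ => Nat.zero_le _)]
        rw [Wm, zero_add]
      rw [maxStep]
      show (if _ > best.1 then _ else best) = _
      rw [hwk]
    · rw [if_pos ((qualB_iff dice.length k).mpr hq), if_neg hq]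

lemma A_char (dice : List (List Int)) :
    solution dice
      = ((((qualMasks dice.length).filter (fun k => !(cart dice (g0 dice.length k) == []))).map
          (fun k => (g0 dice.length k, Wm dice dice.length k))).foldl maxStep
            ((0 : Int), ([] : List Int))).2.map (fun j => j + 1) := by
  simp only [solution]
  rw [mask_list, List.foldl_map]
  rw [PySem.List.foldl_congr_mem (List.range (2^dice.length)) _
    (fun d k => if qual dice.length k = true then (aS dice dice.length k).foldl
      (fun d x => d.modify (g0 dice.length k) 0
        (fun w => w + ((countLT (bS dice dice.length k) x : Nat) : Int))) d else d)
    PySem.Dict.empty ?hstep]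
  · rw [PySem.List.foldl_ite_eq_foldl_filter (fun k => qual dice.length k = true)]
    have hfq : (List.range (2^dice.length)).filter (fun x => decide (qual dice.length x = true))
        = qualMasks dice.length := by
      rw [qualMasks]
      apply List.filter_congr
      intro x _
      simp
    rw [hfq]
    rw [fold_insert_items dice dice.length (qualMasks dice.length) PySem.Dict.empty
      PySem.Dict.nodup_keys_empty (by intro k _ h; simp at h)
      (g0_nodup dice.length _ (List.Nodup.filter _ List.nodup_range)
        (fun k hk => by simpa using List.mem_range.mp (List.mem_of_mem_filter hk)))]
    have hie : (PySem.Dict.empty : PySem.Dict (List Int) Int).items = [] := rfl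
    rw [hie, List.nil_append, plusOne_fold]
    rfl
  case hstep =>
    intro d k hk
    have hklt : k < 2^dice.length := List.mem_range.mp hk
    dsimp only
    by_cases hq : qual dice.length k = true
    · rw [if_pos ((qualA_iff dice.length k hklt).mpr hq), if_pos hq, peel_eq]
      have hget : ∀ (g : List Int), getSums g dice 0 [] = cart dice g := by
        intro g
        rw [getSums_eq]
        simp
      show (PySem.List.sorted (getSums (g0 dice.length k, g1 dice.length k).1 dice 0 []) (fun x => x) false).foldl
          (fun d a_num => d.modify (g0 dice.length k, g1 dice.length k).1 0
            (· + (PySem.List.bisectLeft (PySem.List.sorted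
              (getSums (g0 dice.length k, g1 dice.length k).2 dice 0 []) (fun x => x) false) a_num : Int))) d = _
      simp only [hget]
      have hfn : (fun (d : PySem.Dict (List Int) Int) a_num => d.modify (g0 dice.length k) 0
            (· + (PySem.List.bisectLeft (PySem.List.sorted (cart dice (g1 dice.length k)) (fun x => x) false) a_num : Int)))
          = (fun d x => d.modify (g0 dice.length k) 0
            (fun w => w + ((countLT (bS dice dice.length k) x : Nat) : Int))) := by
        funext d x
        rw [show PySem.List.sorted (cart dice (g1 dice.length k)) (fun x => x) false
            = bS dice dice.length k from rfl,
          bisectLeft_eq _ (bS_pairwise dice dice.length k)]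
      rw [hfn]
      rfl
    · rw [if_neg (fun h => hq ((qualA_iff dice.length k hklt).mp h)), if_neg hq]

lemma main_eq (dice : List (List Int)) : solution dice = solution_alt dice := by
  rw [A_char, B_char]
  have hdrop1 := maxFold_drop
    (((qualMasks dice.length).filter (fun k => !(cart dice (g0 dice.length k) == []))).map
      (fun k => (g0 dice.length k, Wm dice dice.length k))) ((0 : Int), ([] : List Int)) (le_refl 0)
  have hdrop2 := maxFold_drop (cand dice dice.length) ((0 : Int), ([] : List Int)) (le_refl 0)
  rw [hdrop1, hdrop2, cand, List.filter_map, List.filter_map, List.filter_filter]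
  have hfe : (qualMasks dice.length).filter
        (fun a => ((fun kv => decide (0 < kv.2)) ∘ (fun k => (g0 dice.length k, Wm dice dice.length k))) a
          && !(cart dice (g0 dice.length a) == []))
      = (qualMasks dice.length).filter
        (fun a => ((fun kv => decide (0 < kv.2)) ∘ (fun k => (g0 dice.length k, Wm dice dice.length k))) a) := by
    apply List.filter_congr
    intro x _
    by_cases hc : cart dice (g0 dice.length x) = []
    · simp [Function.comp, hc, Wm_of_cart_nil dice dice.length x hc]
    · simp [Function.comp, hc]
  rw [hfe]

-- ===== VERDICT (by name: the statement is the Claim_ definition above) =====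
theorem solution_spec : Claim_equal_solution := by
  intro dice _
  unfold Spec_solution
  exact main_eq dice
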